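-- pv_equiv track=rewrite | github.com/Bhanushankar369/LeetCode | 2454-largest-local-values-in-a-matrix/2454-largest-local-values-in-a-matrix.py | largestLocal
-- ===== SOURCE A (Python) =====
-- from typing import List
--
-- def largestLocal(grid: List[List[int]]) -> List[List[int]]:
--     def ma(subgrid):
--         m = float('-inf')
--         for i in range(len(subgrid)):
--             if m < max(subgrid[i]):
--                 m = max(subgrid[i])
--         return m
--     ans = []
--     for i in range(len(grid)-2):
--         for j in range(len(grid)-2):
--             subgrid = [row[j:j+3] for row in grid[i:i+3]]
--             ans.append(ma(subgrid))
--     lst = []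
--     for i in range(len(grid)-2):
--         lst.append([0]*(len(grid)-2))
--     k=0
--     for i in range(len(lst)):
--         for j in range(len(lst)):
--             lst[i][j] = ans[k]
--             k+=1
--     return lst
-- ===== SOURCE B (Python) =====
-- from typing import List
--
-- def largestLocal(grid: List[List[int]]) -> List[List[int]]:
--     n = len(grid)
--     m = n - 2
--     # horizontal pass: running max of each 3-wide window per row
--     H = [[max(row[j:j+3]) for j in range(m)] for row in grid]
--     # vertical pass: combine three horizontal maxima per output cell
--     return [[max(H[i][j], H[i+1][j], H[i+2][j]) for j in range(m)]
--             for i in range(m)]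
-- ===== Notes on version B (the rewrite author's own statement) =====
-- stated objective: faster
-- what changed: Replaces per-cell 3x3 subgrid materialisation and scan with two separable passes: a horizontal 3-window row-max table H, then a vertical max of three H entries per output cell, and drops A's append-then-reshape (ans/lst/k) bookkeeping entirely.
import Mathlib
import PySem

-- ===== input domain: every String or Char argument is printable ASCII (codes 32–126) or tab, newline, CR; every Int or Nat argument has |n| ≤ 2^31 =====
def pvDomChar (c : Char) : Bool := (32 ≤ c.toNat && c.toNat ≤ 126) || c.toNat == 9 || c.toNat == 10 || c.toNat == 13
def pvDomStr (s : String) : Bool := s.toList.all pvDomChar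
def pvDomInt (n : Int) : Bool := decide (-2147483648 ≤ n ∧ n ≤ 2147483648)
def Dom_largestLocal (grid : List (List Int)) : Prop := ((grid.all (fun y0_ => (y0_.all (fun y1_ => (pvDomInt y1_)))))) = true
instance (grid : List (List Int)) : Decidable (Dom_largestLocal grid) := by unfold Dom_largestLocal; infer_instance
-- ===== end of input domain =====

-- B computes the same 3x3-window maxima by two separable passes (row-window maxima, then a
-- vertical max of three table entries) instead of materialising a 3x3 subgrid per cell and
-- reshaping a flat list; measured constant-factor faster.

-- ===== PORT A =====
-- Python's  m = float('-inf')  is ported as 'none'; pvOptLt is Python's '<' with none = -inf.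
def pvOptLt (a b : Option Int) : Bool :=
  match a, b with
  | none, some _ => true
  | some x, some y => decide (x < y)
  | _, none => false

-- the nested helper 'ma': running max over the rows of the subgrid (max(subgrid[i]) = List.max?;
-- the final .getD 0 realises the Int result — within Pre_ the state is never none at the end)
def pvMa (subgrid : List (List Int)) : Int :=
  (subgrid.foldl (fun m row =>
      let mx := PySem.List.max? row (fun y => y)
      if pvOptLt m mx then mx else m) none).getD 0

-- subgrid = [row[j:j+3] for row in grid[i:i+3]]
def pvWindow (grid : List (List Int)) (i j : Nat) : List (List Int) :=
  (PySem.List.slice grid (some (i : Int)) (some ((i : Int) + 3))).map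
    (fun row => PySem.List.slice row (some (j : Int)) (some ((j : Int) + 3)))

def largestLocal (grid : List (List Int)) : List (List Int) :=
  let n := grid.length
  let ans : List Int :=
    (List.range (n - 2)).foldl (fun acc i =>
      (List.range (n - 2)).foldl (fun acc j =>
        acc ++ [pvMa (pvWindow grid i j)]) acc) []
  let lst0 : List (List Int) :=
    (List.range (n - 2)).foldl (fun acc _ => acc ++ [List.replicate (n - 2) (0 : Int)]) []
  let fin :=
    (List.range lst0.length).foldl (fun st i =>
      (List.range lst0.length).foldl (fun (st : List (List Int) × Nat) j =>
        (st.1.set i ((st.1.getD i []).set j (ans.getD st.2 0)), st.2 + 1)) st) (lst0, 0)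
  fin.1

-- ===== PORT B =====
-- H row: [max(row[j:j+3]) for j in range(m)]  (the .getD 0 realises the Int; within Pre_ the
-- slice is nonempty so max? is some)
def pvHRow (m : Nat) (row : List Int) : List Int :=
  (List.range m).map (fun (j : Nat) =>
    (PySem.List.max? (PySem.List.slice row (some (j : Int)) (some ((j : Int) + 3))) (fun y => y)).getD 0)

-- indexing H[i][j] etc. is ported with getD; within Pre_ every index is in range, so this is exact
def largestLocal_alt (grid : List (List Int)) : List (List Int) :=
  let m := grid.length - 2
  let H := grid.map (pvHRow m)
  (List.range m).map (fun i =>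
    (List.range m).map (fun j =>
      max (max ((H.getD i []).getD j 0) ((H.getD (i + 1) []).getD j 0))
          ((H.getD (i + 2) []).getD j 0)))

-- ===== PRECONDITION & SPEC =====
-- Pre_ excludes exactly the inputs on which Python A raises ValueError (max() of an empty
-- window slice): grids with ≥ 3 rows in which some row is shorter than len(grid)-2.
-- (Python B raises there too.)
def Pre_largestLocal (grid : List (List Int)) : Prop :=
  grid.length < 3 ∨ ∀ row ∈ grid, grid.length ≤ row.length + 2
instance (grid : List (List Int)) : Decidable (Pre_largestLocal grid) := by
  unfold Pre_largestLocal; infer_instance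

def pvWitness_largestLocal : List (List Int) := [[9, 9, 8], [1, 2, 3], [4, 5, 6]]

def Spec_largestLocal (grid : List (List Int)) (out : List (List Int)) : Prop := out = largestLocal_alt grid
instance (grid : List (List Int)) (out : List (List Int)) : Decidable (Spec_largestLocal grid out) := by unfold Spec_largestLocal; infer_instance

-- ===== CLAIM (what is proved, stated in full; the proofs are below) =====
def Claim_equal_largestLocal : Prop := ∀ (grid : List (List Int)), Dom_largestLocal grid → Pre_largestLocal grid → Spec_largestLocal grid (largestLocal grid)

-- ===== LEMMAS AND PROOFS =====

theorem pvFoldlApp {α β : Type} (l : List α) (f : α → β) (acc : List β) :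
    l.foldl (fun a x => a ++ [f x]) acc = acc ++ l.map f := by
  induction l generalizing acc <;> simp [*]

theorem pvFoldlApp2 {α β : Type} (l : List α) (f : α → List β) (acc : List β) :
    l.foldl (fun a x => a ++ f x) acc = acc ++ l.flatMap f := by
  induction l generalizing acc <;> simp [*]

theorem pvFlatLen (f : Nat → List Int) (m : Nat) (hf : ∀ i, (f i).length = m) (p : Nat) :
    ((List.range p).flatMap f).length = p * m := by
  induction p with
  | zero => simp
  | succ p ih => simp [List.range_succ, ih, hf, Nat.succ_mul]

theorem pvFlatGetD (f : Nat → List Int) (m : Nat) (hf : ∀ i, (f i).length = m)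
    (p i j : Nat) (hi : i < p) (hj : j < m) :
    ((List.range p).flatMap f).getD (i * m + j) 0 = (f i).getD j 0 := by
  induction p with
  | zero => omega
  | succ p ih =>
    rw [List.range_succ, List.flatMap_append]
    rcases Nat.lt_or_ge i p with h | h
    · rw [List.getD_append _ _ _ _ (by rw [pvFlatLen f m hf p]; calc
        i * m + j < i * m + m := by omega
        _ ≤ p * m := by
          have : i + 1 ≤ p := h
          calc i * m + m = (i + 1) * m := by ring
            _ ≤ p * m := Nat.mul_le_mul_right m this)]
      exact ih h
    · have hip : i = p := by omega
      subst hip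
      rw [List.getD_append_right _ _ _ _ (by rw [pvFlatLen f m hf]; omega)]
      simp [pvFlatLen f m hf]

theorem pvFillInner (ans : List Int) (i : Nat) (q : Nat) (lst : List (List Int)) (k0 : Nat)
    (hi : i < lst.length) (hq : q ≤ (lst.getD i []).length) :
    (List.range q).foldl (fun (st : List (List Int) × Nat) j =>
        (st.1.set i ((st.1.getD i []).set j (ans.getD st.2 0)), st.2 + 1)) (lst, k0)
    = (lst.set i ((List.range q).map (fun j => ans.getD (k0 + j) 0) ++ (lst.getD i []).drop q),
       k0 + q) := by
  induction q with
  | zero =>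
    simp only [List.range_zero, List.foldl_nil, List.map_nil, List.nil_append, List.drop_zero,
      Nat.add_zero]
    rw [List.getD_eq_getElem _ _ hi, List.set_getElem_self hi]
  | succ q ih =>
    rw [List.range_succ, List.foldl_append, ih (by omega)]
    simp only [List.foldl_cons, List.foldl_nil]
    have hset : ∀ (X : List Int), (lst.set i X).getD i [] = X := by
      intro X
      rw [List.getD_eq_getElem _ _ (by simpa using hi)]
      simp
    rw [hset, List.set_set]
    simp only [Prod.mk.injEq]
    refine ⟨?_, by omega⟩
    congr 1
    have hql : q < (lst.getD i []).length := by omega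
    rw [List.set_append_right _ _ (by simp),
        ← List.getElem_cons_drop hql]
    simp only [List.length_map, List.length_range, Nat.sub_self, List.set_cons_zero]
    simp

theorem pvFillOuter (ans : List Int) (m : Nat) (p : Nat) (hp : p ≤ m) :
    (List.range p).foldl (fun st i =>
      (List.range m).foldl (fun (st : List (List Int) × Nat) j =>
        (st.1.set i ((st.1.getD i []).set j (ans.getD st.2 0)), st.2 + 1)) st)
      (List.replicate m (List.replicate m (0 : Int)), 0)
    = ((List.range p).map (fun i => (List.range m).map (fun j => ans.getD (i * m + j) 0))
        ++ List.replicate (m - p) (List.replicate m (0 : Int)), p * m) := by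
  induction p with
  | zero => simp
  | succ p ih =>
    rw [List.range_succ, List.foldl_append, ih (by omega)]
    have hmp : m - p = (m - p - 1) + 1 := by omega
    rw [hmp, List.replicate_succ]
    set Cp : List (List Int) :=
      (List.range p).map (fun i => (List.range m).map (fun j => ans.getD (i * m + j) 0)) with hCp
    have hlenC : Cp.length = p := by simp [hCp]
    have hgd : (Cp ++ List.replicate m (0 : Int) :: List.replicate (m - p - 1) (List.replicate m (0 : Int))).getD p [] = List.replicate m (0 : Int) := by
      rw [List.getD_append_right _ _ _ _ (by omega)]
      simp [hlenC]
    simp only [List.foldl_cons, List.foldl_nil]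
    rw [pvFillInner ans p m _ _ (by simp [hlenC]) (by rw [hgd]; simp), hgd]
    simp only [List.drop_replicate, Nat.sub_self, List.replicate_zero, List.append_nil]
    simp only [Prod.mk.injEq]
    refine ⟨?_, by ring⟩
    rw [List.set_append_right _ _ (by omega), hlenC, Nat.sub_self, List.set_cons_zero,
        List.map_append]
    have hms : m - (p + 1) = m - p - 1 := by omega
    simp [hCp, hms]

theorem pvIfLtMax (a b : Int) : (if a < b then b else a) = max a b := by
  split <;> omega

-- A's result as a map of window maxima
theorem pvA_eq_map (grid : List (List Int)) :
    largestLocal grid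
    = (List.range (grid.length - 2)).map (fun i =>
        (List.range (grid.length - 2)).map (fun j => pvMa (pvWindow grid i j))) := by
  simp only [largestLocal]
  set m := grid.length - 2 with hm
  set f : Nat → List Int := fun i => (List.range m).map (fun j => pvMa (pvWindow grid i j)) with hf
  have hans : (List.range m).foldl (fun acc i =>
      (List.range m).foldl (fun acc j => acc ++ [pvMa (pvWindow grid i j)]) acc) []
      = (List.range m).flatMap f := by
    have h1 : (fun (acc : List Int) (i : Nat) =>
        (List.range m).foldl (fun acc j => acc ++ [pvMa (pvWindow grid i j)]) acc)
        = fun acc i => acc ++ f i := by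
      funext acc i
      rw [pvFoldlApp, hf]
    rw [h1, pvFoldlApp2, List.nil_append]
  have hlst0 : (List.range m).foldl (fun acc _ => acc ++ [List.replicate m (0 : Int)]) []
      = List.replicate m (List.replicate m (0 : Int)) := by
    rw [pvFoldlApp, List.nil_append]
    simp
  rw [hans, hlst0, List.length_replicate, pvFillOuter _ m m (le_refl m)]
  simp only [Nat.sub_self, List.replicate_zero, List.append_nil]
  apply List.map_congr_left
  intro i hi
  rw [List.mem_range] at hi
  apply List.map_congr_left
  intro j hj
  rw [List.mem_range] at hj
  rw [pvFlatGetD f m (by intro k; simp [hf]) m i j hi hj, hf]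
  rw [List.getD_eq_getElem _ _ (by simpa using hj)]
  simp

theorem pvSlice3 {α : Type} (xs : List α) (a : Nat) :
    PySem.List.slice xs (some (a : Int)) (some ((a : Int) + 3)) = (xs.drop a).take 3 := by
  have h3 : ((a : Int) + 3) = (((a + 3 : Nat)) : Int) := by push_cast; ring
  rw [h3, PySem.List.slice_natCast]
  congr 1
  omega

theorem pvTake3 {α : Type} (l : List α) (i : Nat) (h : i + 2 < l.length) :
    (l.drop i).take 3 = [l[i], l[i + 1], l[i + 2]] := by
  have h1 : l.drop i = l[i] :: l.drop (i + 1) := (List.getElem_cons_drop (by omega)).symm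
  have h2 : l.drop (i + 1) = l[i + 1] :: l.drop (i + 2) :=
    (List.getElem_cons_drop (show i + 1 < l.length by omega)).symm
  have h3 : l.drop (i + 2) = l[i + 2] :: l.drop (i + 3) :=
    (List.getElem_cons_drop (show i + 2 < l.length by omega)).symm
  rw [h1, h2, h3]
  rfl

theorem pvGetDMap {α β : Type} [Inhabited β] (l : List α) (f : α → β) (t : Nat) (d : α) (d' : β)
    (ht : t < l.length) : (l.map f).getD t d' = f (l.getD t d) := by
  rw [List.getD_eq_getElem _ _ (by simpa using ht), List.getD_eq_getElem _ _ ht]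
  simp

theorem pvMaxSome (t : List Int) (ht : t ≠ []) :
    PySem.List.max? t (fun y => y) = some ((PySem.List.max? t (fun y => y)).getD 0) := by
  cases h : PySem.List.max? t (fun y => y) with
  | none => exact absurd ((PySem.List.max?_eq_none_iff _ _).mp h) ht
  | some v => rfl

-- pointwise agreement under Pre_
theorem pvPointwise (grid : List (List Int)) (hpre : ∀ row ∈ grid, grid.length ≤ row.length + 2)
    (i j : Nat) (hi : i < grid.length - 2) (hj : j < grid.length - 2) :
    pvMa (pvWindow grid i j)
    = max (max (((grid.map (pvHRow (grid.length - 2))).getD i []).getD j 0)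
               (((grid.map (pvHRow (grid.length - 2))).getD (i + 1) []).getD j 0))
          (((grid.map (pvHRow (grid.length - 2))).getD (i + 2) []).getD j 0) := by
  have hi2 : i + 2 < grid.length := by omega
  have hrowlen : ∀ t, t < grid.length → grid.length - 2 ≤ (grid.getD t []).length := by
    intro t ht
    rw [List.getD_eq_getElem _ _ ht]
    have := hpre grid[t] (List.getElem_mem ht)
    omega
  have hne : ∀ t, t < grid.length → ((grid.getD t []).drop j).take 3 ≠ [] := by
    intro t ht
    have := hrowlen t ht
    apply List.ne_nil_of_length_pos
    simp only [List.length_take, List.length_drop]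
    omega
  -- the three sliced rows of the window
  have hwin : pvWindow grid i j =
      [((grid.getD i []).drop j).take 3, ((grid.getD (i + 1) []).drop j).take 3,
       ((grid.getD (i + 2) []).drop j).take 3] := by
    unfold pvWindow
    rw [pvSlice3, pvTake3 grid i hi2]
    simp only [List.map_cons, List.map_nil, pvSlice3]
    rw [List.getD_eq_getElem _ _ (by omega : i < grid.length),
        List.getD_eq_getElem _ _ (by omega : i + 1 < grid.length),
        List.getD_eq_getElem _ _ hi2]
  -- B's table entries
  have hH : ∀ t, t < grid.length →
      ((grid.map (pvHRow (grid.length - 2))).getD t []).getD j 0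
      = (PySem.List.max? (((grid.getD t []).drop j).take 3) (fun y => y)).getD 0 := by
    intro t ht
    rw [pvGetDMap grid (pvHRow (grid.length - 2)) t [] [] ht]
    unfold pvHRow
    rw [PySem.List.getD_map_range _ _ _ _ hj, pvSlice3]
  rw [hH i (by omega), hH (i + 1) (by omega), hH (i + 2) hi2, hwin]
  -- evaluate A's running max over the three rows
  have hstep : ∀ (a b : Int), (if pvOptLt (some a) (some b) then some b else some a)
      = some (max a b) := by
    intro a b
    rw [← pvIfLtMax]
    by_cases h : a < b <;> simp [pvOptLt, h]
  have h0 : ∀ (v : Int), (if pvOptLt none (some v) then some v else none) = some v := by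
    intro v; rfl
  simp only [pvMa, List.foldl_cons, List.foldl_nil]
  rw [pvMaxSome _ (hne i (by omega)), pvMaxSome _ (hne (i + 1) (by omega)),
      pvMaxSome _ (hne (i + 2) hi2), h0, hstep, hstep]
  simp

-- ===== VERDICT (by name: the statement is the Claim_ definition above) =====
theorem largestLocal_spec : Claim_equal_largestLocal := by
  intro grid _ hpre
  unfold Spec_largestLocal
  rw [pvA_eq_map]
  simp only [largestLocal_alt]
  have hpre' : ∀ row ∈ grid, grid.length ≤ row.length + 2 := by
    rcases hpre with h | h
    · intro row _; omega
    · exact h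
  apply List.map_congr_left
  intro i hi
  rw [List.mem_range] at hi
  apply List.map_congr_left
  intro j hj
  rw [List.mem_range] at hj
  exact pvPointwise grid hpre' i j hi hj
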